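-- pv_equiv track=rewrite | github.com/ZJU-SPAIL/pipa | src/static_collector.py | _parse_nmcli_output
-- ===== SOURCE A (Python) =====
-- def _parse_nmcli_output(raw_output: str) -> list:
--     """解析 nmcli device show 的输出。"""
--     devices = []
--     current_device = {}
--
--     for line in raw_output.splitlines():
--         line = line.strip()
--
--         if not line:
--             if current_device:
--                 devices.append(current_device)
--                 current_device = {}
--             continue
--
--         if ":" in line:
--             key, value = line.split(":", 1)
--             key = key.strip().replace(" ", "_").upper()
--             value = value.strip()
--
--             # 使用更简洁的键名
--             if "." in key:
--                 key = key.split(".", 1)[1]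
--
--             # 移除空值
--             if value:
--                 current_device[key] = value
--
--     if current_device:
--         devices.append(current_device)
--
--     return devices
-- ===== SOURCE B (Python) =====
-- def _parse_line(line):
--     """Parse one 'KEY: value' line; None if it carries no valued pair."""
--     line = line.strip()
--     if ":" not in line:
--         return None
--     key, value = line.split(":", 1)
--     value = value.strip()
--     if not value:
--         return None
--     key = key.strip().replace(" ", "_").upper()
--     if "." in key:
--         key = key.split(".", 1)[1]
--     return (key, value)
--
--
-- def _parse_nmcli_output(raw_output: str) -> list:
--     # Pass 1: group the lines into blocks separated by blank lines.
--     blocks = []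
--     block = []
--     for line in raw_output.splitlines():
--         if line.strip():
--             block.append(line)
--         else:
--             if block:
--                 blocks.append(block)
--             block = []
--     if block:
--         blocks.append(block)
--
--     # Pass 2: each block becomes a device dict; drop devices with no data.
--     def parse_block(blk):
--         device = {}
--         for line in blk:
--             kv = _parse_line(line)
--             if kv is not None:
--                 device[kv[0]] = kv[1]
--         return device
--
--     return [d for d in (parse_block(b) for b in blocks) if d]
-- ===== Notes on version B (the rewrite author's own statement) =====
-- stated objective: alternative
-- what changed: A builds the device list in one streaming pass that interleaves line parsing with blank-line bookkeeping on a (devices, current_dict) state; B first groups the lines into blank-separated blocks, then maps an independent per-block parser (with a separate _parse_line helper) over the blocks and keeps the non-empty dicts.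
import Mathlib
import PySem

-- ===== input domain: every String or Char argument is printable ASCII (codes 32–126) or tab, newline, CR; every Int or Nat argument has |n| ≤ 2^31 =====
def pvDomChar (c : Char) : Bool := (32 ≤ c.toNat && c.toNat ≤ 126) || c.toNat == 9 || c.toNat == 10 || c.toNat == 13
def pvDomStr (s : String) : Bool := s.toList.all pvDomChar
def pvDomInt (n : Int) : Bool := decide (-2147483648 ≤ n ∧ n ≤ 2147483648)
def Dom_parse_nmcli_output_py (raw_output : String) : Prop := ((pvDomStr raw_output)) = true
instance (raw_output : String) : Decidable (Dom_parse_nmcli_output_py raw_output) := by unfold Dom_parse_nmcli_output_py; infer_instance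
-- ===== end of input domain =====

-- B re-decomposes A's single streaming pass into two passes (group lines into blank-separated
-- blocks, then parse each block into a dict); same cost, different decomposition ("alternative").

-- ===== PORT A =====
-- A's loop body: state = (finished devices, current device dict); transcribed verbatim.
def pvALoop (st : List (List (String × String)) × PySem.Dict String String) (line0 : String) :
    List (List (String × String)) × PySem.Dict String String :=
  let line := PySem.Str.strip line0
  if line = "" then
    if st.2.items ≠ [] then (st.1 ++ [st.2.items], (PySem.Dict.empty : PySem.Dict String String)) else st
  else if PySem.Str.isIn ":" line then
    let parts := (PySem.Str.splitMax? line ":" 1).getD []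
    let key0 := PySem.Str.upper (PySem.Str.replace (PySem.Str.strip (parts.getD 0 "")) " " "_")
    let value := PySem.Str.strip (parts.getD 1 "")
    let key := if PySem.Str.isIn "." key0 then ((PySem.Str.splitMax? key0 "." 1).getD []).getD 1 "" else key0
    if value ≠ "" then (st.1, st.2.insert key value) else st
  else st

def parse_nmcli_output_py (raw_output : String) : List (List (String × String)) :=
  let r := (PySem.Str.splitlines raw_output).foldl pvALoop ([], PySem.Dict.empty)
  r.1 ++ (if r.2.items ≠ [] then [r.2.items] else [])

-- ===== PORT B =====
-- B's helper `_parse_line`: one line to an optional (key, value) pair.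
def pvParseLine (line0 : String) : Option (String × String) :=
  let line := PySem.Str.strip line0
  if PySem.Str.isIn ":" line then
    let parts := (PySem.Str.splitMax? line ":" 1).getD []
    let value := PySem.Str.strip (parts.getD 1 "")
    if value = "" then none
    else
      let key0 := PySem.Str.upper (PySem.Str.replace (PySem.Str.strip (parts.getD 0 "")) " " "_")
      some (if PySem.Str.isIn "." key0 then ((PySem.Str.splitMax? key0 "." 1).getD []).getD 1 "" else key0, value)
  else none

-- B's helper `parse_block`: fold the lines of one block into a dict.
def pvParseBlock (blk : List String) : PySem.Dict String String :=
  blk.foldl (fun d line =>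
    match pvParseLine line with
    | some kv => d.insert kv.1 kv.2
    | none => d) PySem.Dict.empty

-- B's grouping loop body: state = (finished blocks, current block of raw lines).
def pvBLoop (st : List (List String) × List String) (line : String) :
    List (List String) × List String :=
  if PySem.Str.strip line ≠ "" then (st.1, st.2 ++ [line])
  else if st.2 ≠ [] then (st.1 ++ [st.2], ([] : List String)) else st

def parse_nmcli_output_py_alt (raw_output : String) : List (List (String × String)) :=
  let g := (PySem.Str.splitlines raw_output).foldl pvBLoop ([], [])
  let blocks := g.1 ++ (if g.2 ≠ [] then [g.2] else [])
  (blocks.map (fun b => (pvParseBlock b).items)).filter (fun d => !d.isEmpty)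

-- ===== PRECONDITION & SPEC =====
def Spec_parse_nmcli_output_py (raw_output : String) (out : List (List (String × String))) : Prop := out = parse_nmcli_output_py_alt raw_output
instance (raw_output : String) (out : List (List (String × String))) : Decidable (Spec_parse_nmcli_output_py raw_output out) := by unfold Spec_parse_nmcli_output_py; infer_instance

-- ===== CLAIM (what is proved, stated in full; the proofs are below) =====
def Claim_equal_parse_nmcli_output_py : Prop := ∀ (raw_output : String), Dom_parse_nmcli_output_py raw_output → Spec_parse_nmcli_output_py raw_output (parse_nmcli_output_py raw_output)

-- ===== LEMMAS AND PROOFS =====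

-- A's per-line dict update, phrased through B's `pvParseLine`.
def pvU (d : PySem.Dict String String) (line : String) : PySem.Dict String String :=
  match pvParseLine line with
  | some kv => d.insert kv.1 kv.2
  | none => d

-- A's finalization of the fold state.
def pvFin (st : List (List (String × String)) × PySem.Dict String String) : List (List (String × String)) :=
  st.1 ++ (if st.2.items ≠ [] then [st.2.items] else [])

-- Device list produced by the rest of the input, given the current (partial) device dict.
def pvCB (d : PySem.Dict String String) : List String → List (List (String × String))
  | [] => if d.items ≠ [] then [d.items] else []
  | l :: ls =>
    if PySem.Str.strip l = "" then (if d.items ≠ [] then [d.items] else []) ++ pvCB PySem.Dict.empty ls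
    else pvCB (pvU d l) ls

-- Block list produced by the rest of the input, given the current (partial) block.
def pvBB (cur : List String) : List String → List (List String)
  | [] => if cur ≠ [] then [cur] else []
  | l :: ls =>
    if PySem.Str.strip l = "" then (if cur ≠ [] then [cur] else []) ++ pvBB [] ls
    else pvBB (cur ++ [l]) ls

theorem pvALoop_blank (st : List (List (String × String)) × PySem.Dict String String)
    (line : String) (h : PySem.Str.strip line = "") :
    pvALoop st line = if st.2.items ≠ [] then (st.1 ++ [st.2.items], PySem.Dict.empty) else st := by
  unfold pvALoop
  rw [h]
  simp

set_option maxHeartbeats 1000000 in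
theorem pvALoop_nonblank (st : List (List (String × String)) × PySem.Dict String String)
    (line : String) (h : PySem.Str.strip line ≠ "") :
    pvALoop st line = (st.1, pvU st.2 line) := by
  unfold pvALoop pvU pvParseLine
  rw [if_neg h]
  by_cases h1 : PySem.Str.isIn ":" (PySem.Str.strip line) = true
  · rw [if_pos h1, if_pos h1]
    by_cases h2 : PySem.Str.strip (((PySem.Str.splitMax? (PySem.Str.strip line) ":" 1).getD []).getD 1 "") = ""
    · rw [if_neg (not_not_intro h2), if_pos h2]
    · rw [if_pos h2, if_neg h2]
  · rw [if_neg h1, if_neg h1]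

theorem pvA_char (lines : List String) :
    ∀ (devs : List (List (String × String))) (d : PySem.Dict String String),
      pvFin (lines.foldl pvALoop (devs, d)) = devs ++ pvCB d lines := by
  induction lines with
  | nil => intro devs d; rfl
  | cons l ls ih =>
    intro devs d
    by_cases h : PySem.Str.strip l = ""
    · rw [List.foldl_cons, pvALoop_blank _ _ h]
      by_cases hd : d.items ≠ []
      · rw [if_pos hd, ih]
        simp [pvCB, h, hd]
      · rw [if_neg hd, ih]
        have hde : d = PySem.Dict.empty := PySem.Dict.ext (by simpa using hd)
        simp [pvCB, h, hde, PySem.Dict.empty]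
    · rw [List.foldl_cons, pvALoop_nonblank _ _ h, ih]
      simp [pvCB, h]

theorem pvB_char (lines : List String) :
    ∀ (acc : List (List String)) (cur : List String),
      (lines.foldl pvBLoop (acc, cur)).1 ++
          (if (lines.foldl pvBLoop (acc, cur)).2 ≠ [] then [(lines.foldl pvBLoop (acc, cur)).2] else []) =
        acc ++ pvBB cur lines := by
  induction lines with
  | nil => intro acc cur; rfl
  | cons l ls ih =>
    intro acc cur
    by_cases h : PySem.Str.strip l = ""
    · have hb : pvBLoop (acc, cur) l = if cur ≠ [] then (acc ++ [cur], ([] : List String)) else (acc, cur) := by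
        unfold pvBLoop; simp [h]
      rw [List.foldl_cons, hb]
      by_cases hc : cur ≠ []
      · rw [if_pos hc, ih]
        simp [pvBB, h, hc]
      · rw [if_neg hc, ih]
        simp at hc
        simp [pvBB, h, hc]
    · have hb : pvBLoop (acc, cur) l = (acc, cur ++ [l]) := by
        unfold pvBLoop; simp [h]
      rw [List.foldl_cons, hb, ih]
      simp [pvBB, h]

theorem pvParseBlock_append (blk : List String) (l : String) :
    pvParseBlock (blk ++ [l]) = pvU (pvParseBlock blk) l := by
  unfold pvParseBlock pvU
  rw [List.foldl_append]
  rfl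

theorem pvBridge (lines : List String) :
    ∀ (cur : List String),
      pvCB (pvParseBlock cur) lines =
        ((pvBB cur lines).map (fun b => (pvParseBlock b).items)).filter (fun d => !d.isEmpty) := by
  induction lines with
  | nil =>
    intro cur
    by_cases hc : cur = []
    · subst hc
      simp [pvCB, pvBB, pvParseBlock, PySem.Dict.empty]
    · simp only [pvCB, pvBB, if_pos (by simpa using hc), List.map_cons, List.map_nil,
        List.filter_cons, List.filter_nil]
      by_cases hd : (pvParseBlock cur).items ≠ []
      · simp [hd]
      · simp at hd
        simp [hd]
  | cons l ls ih =>
    intro cur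
    by_cases h : PySem.Str.strip l = ""
    · have he : (PySem.Dict.empty : PySem.Dict String String) = pvParseBlock [] := rfl
      simp only [pvCB, pvBB, if_pos h, he, ih [], List.map_append, List.filter_append]
      congr 1
      by_cases hc : cur = []
      · subst hc
        simp [pvParseBlock, PySem.Dict.empty]
      · simp only [if_pos (by simpa using hc), List.map_cons, List.map_nil, List.filter_cons,
          List.filter_nil]
        by_cases hd : (pvParseBlock cur).items ≠ []
        · simp [hd]
        · simp at hd
          simp [hd]
    · simp only [pvCB, pvBB, if_neg h, ← pvParseBlock_append, ih]

-- ===== VERDICT (by name: the statement is the Claim_ definition above) =====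
theorem parse_nmcli_output_py_spec : Claim_equal_parse_nmcli_output_py := by
  intro raw_output _
  unfold Spec_parse_nmcli_output_py
  have hport : parse_nmcli_output_py raw_output =
      pvFin ((PySem.Str.splitlines raw_output).foldl pvALoop ([], PySem.Dict.empty)) := rfl
  have halt : parse_nmcli_output_py_alt raw_output =
      ((((PySem.Str.splitlines raw_output).foldl pvBLoop ([], [])).1 ++
            (if ((PySem.Str.splitlines raw_output).foldl pvBLoop ([], [])).2 ≠ [] then
              [((PySem.Str.splitlines raw_output).foldl pvBLoop ([], [])).2]
            else [])).map (fun b => (pvParseBlock b).items)).filter (fun d => !d.isEmpty) := rfl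
  have he : (PySem.Dict.empty : PySem.Dict String String) = pvParseBlock [] := rfl
  rw [hport, halt, pvA_char (PySem.Str.splitlines raw_output) [] PySem.Dict.empty,
    pvB_char (PySem.Str.splitlines raw_output) [] [], List.nil_append, List.nil_append,
    he, pvBridge]
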